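-- pv_equiv track=rewrite | github.com/ugurbilen/pyspark | HW2_UgurBilen_Question4.py | processUser
-- ===== SOURCE A (Python) =====
-- def processUser(line):
--     ratings = line[1]
--     matches = []
--     count = len(ratings)
--     for x in range(count):
--         xList=[]
--         for y in range(count):
--             if((ratings[x][0]!=ratings[y][0]) and (ratings[x][1]==ratings[y][1])):
--                 xList.append(ratings[y][0])
--         matches.append((ratings[x][0],xList))
--     return matches
-- ===== SOURCE B (Python) =====
-- def processUser(line):
--     ratings = line[1]
--     buckets = {}
--     for mid, r in ratings:
--         buckets.setdefault(r, []).append(mid)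
--     return [(mid, [m for m in buckets[r] if m != mid]) for mid, r in ratings]
-- ===== Notes on version B (the rewrite author's own statement) =====
-- stated objective: faster
-- what changed: Replaced the nested O(n^2) pairwise scan with one pass that buckets movie ids by rating in a dict, then emits each entry's bucket minus its own movie id.
import Mathlib
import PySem

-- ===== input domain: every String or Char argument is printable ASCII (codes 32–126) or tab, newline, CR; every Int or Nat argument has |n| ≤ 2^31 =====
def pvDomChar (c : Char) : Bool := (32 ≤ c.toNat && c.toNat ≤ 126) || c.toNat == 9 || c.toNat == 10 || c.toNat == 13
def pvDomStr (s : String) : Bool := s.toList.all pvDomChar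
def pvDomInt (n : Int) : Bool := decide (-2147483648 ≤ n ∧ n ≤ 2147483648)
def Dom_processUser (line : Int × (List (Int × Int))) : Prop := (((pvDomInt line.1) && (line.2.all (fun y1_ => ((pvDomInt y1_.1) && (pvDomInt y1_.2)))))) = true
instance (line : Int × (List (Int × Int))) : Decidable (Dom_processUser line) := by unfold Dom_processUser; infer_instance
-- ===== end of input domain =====

-- B buckets movie ids by rating in one dict pass and emits each bucket minus the entry's own id,
-- replacing A's nested quadratic scan (objective: faster).

-- ===== PORT A =====
def processUser (line : Int × (List (Int × Int))) : List (Int × List Int) :=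
  let ratings := line.2
  let count := PySem.List.len ratings
  (PySem.List.pyRange 0 count 1).foldl (fun ms x =>
    let xList := (PySem.List.pyRange 0 count 1).foldl (fun xList y =>
      if (PySem.List.pyGetD ratings x (0, 0)).1 ≠ (PySem.List.pyGetD ratings y (0, 0)).1 ∧
         (PySem.List.pyGetD ratings x (0, 0)).2 = (PySem.List.pyGetD ratings y (0, 0)).2
      then xList ++ [(PySem.List.pyGetD ratings y (0, 0)).1] else xList) []
    ms ++ [((PySem.List.pyGetD ratings x (0, 0)).1, xList)]) []

-- ===== PORT B =====
def processUser_alt (line : Int × (List (Int × Int))) : List (Int × List Int) :=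
  let ratings := line.2
  let buckets := ratings.foldl (fun d p => d.modify p.2 [] (· ++ [p.1])) PySem.Dict.empty
  ratings.map (fun p => (p.1, (buckets.getD p.2 []).filter (fun m => m ≠ p.1)))

-- ===== PRECONDITION & SPEC =====
def Spec_processUser (line : Int × (List (Int × Int))) (out : List (Int × List Int)) : Prop := out = processUser_alt line
instance (line : Int × (List (Int × Int))) (out : List (Int × List Int)) : Decidable (Spec_processUser line out) := by unfold Spec_processUser; infer_instance

-- ===== CLAIM (what is proved, stated in full; the proofs are below) =====
def Claim_equal_processUser : Prop := ∀ (line : Int × (List (Int × Int))), Dom_processUser line → Spec_processUser line (processUser line)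

-- ===== LEMMAS AND PROOFS =====

-- A's nested index loops, flattened to a map of filters over the list itself.
theorem processUser_eq_canon (line : Int × (List (Int × Int))) :
    processUser line = line.2.map (fun p =>
      (p.1, (line.2.filter (fun q => decide (p.1 ≠ q.1 ∧ p.2 = q.2))).map (·.1))) := by
  simp only [processUser]
  rw [PySem.List.len_eq,
    PySem.List.foldl_pyRange_zero_pyGetD' line.2 (0, 0)
      (fun ms p => ms ++ [(p.1,
        (PySem.List.pyRange 0 (line.2.length : Int) 1).foldl (fun xList y =>
          if p.1 ≠ (PySem.List.pyGetD line.2 y (0, 0)).1 ∧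
             p.2 = (PySem.List.pyGetD line.2 y (0, 0)).2
          then xList ++ [(PySem.List.pyGetD line.2 y (0, 0)).1] else xList) [])] ) []]
  rw [PySem.List.foldl_append_singleton_eq_map]
  simp only [List.nil_append]
  apply List.map_congr_left
  intro p _
  rw [PySem.List.foldl_pyRange_zero_pyGetD' line.2 (0, 0)
      (fun xList q => if p.1 ≠ q.1 ∧ p.2 = q.2 then xList ++ [q.1] else xList) []]
  simp only [PySem.List.foldl_append_ite, List.nil_append]

-- B's bucket for a rating r is the movie ids of the entries rated r, in order.
theorem bucket_eq (rs : List (Int × Int)) (r : Int) :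
    (rs.foldl (fun d p => d.modify p.2 [] (· ++ [p.1])) PySem.Dict.empty).getD r []
      = (rs.filter (fun q => q.2 == r)).map (·.1) := by
  have h : rs.foldl (fun d p => d.modify p.2 [] (· ++ [p.1])) PySem.Dict.empty
      = (rs.map Prod.swap).foldl (fun d q => d.modify q.1 [] (· ++ [q.2])) PySem.Dict.empty := by
    rw [List.foldl_map]; rfl
  rw [h, PySem.Dict.getD_foldl_modify_append]
  simp [List.filter_map, Function.comp_def, List.map_map, Prod.swap]

-- ===== VERDICT (by name: the statement is the Claim_ definition above) =====
theorem processUser_spec : Claim_equal_processUser := by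
  intro line _
  unfold Spec_processUser processUser_alt
  rw [processUser_eq_canon]
  simp only []
  apply List.map_congr_left
  intro p _
  rw [bucket_eq, List.filter_map, List.filter_filter]
  congr 2
  apply List.filter_congr
  intro q _
  simp only [Function.comp_def, Bool.decide_and]
  rw [Bool.eq_iff_iff]
  simp only [Bool.and_eq_true, decide_eq_true_eq, beq_iff_eq]
  constructor <;> rintro ⟨h1, h2⟩ <;> exact ⟨fun h => h1 h.symm, h2.symm⟩
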